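-- pv_equiv track=rewrite | github.com/brevf/locating_pr_power_infrastructure_in_ntl_pixels | src/locate_vectors_in_raster_pixels.py | unpack_qf
-- ===== SOURCE A (Python) =====
-- def unpack_qf(cloud_mask, qf):
--
--     unpacked = bin(cloud_mask)[2:]
--
--     while len(unpacked) < 16:
--         unpacked = '0' + unpacked
--
--     reversed = ''
--
--     unpacked_list = list(unpacked)
--     while unpacked_list:
--         reversed += unpacked_list.pop()
--
--     fill = False
--     if qf == 255:
--         fill = True
--
--     # this only for cirrus clouds; there is separate flag for cloud / clear confidence
--     cloud = False
--     if reversed[9] == '1':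
--         cloud = True
--
--     shadow = False
--     if reversed[8] == '1':
--         shadow = True
--
--     # removed water because may be interested in economic activity near water
--     # also some places post hurricane may be classified as water and don't want to remove these
--
--     # water = False
--     # if reversed[7] == '1':
--     #     water = True
--
--     return fill, cloud, shadow
-- ===== SOURCE B (Python) =====
-- def unpack_qf(cloud_mask, qf):
--     n = abs(cloud_mask)
--     return qf == 255, bool(n & (1 << 9)), bool(n & (1 << 8))
-- ===== Notes on version B (the rewrite author's own statement) =====
-- stated objective: idiomatic
-- what changed: Replaces the binary-string construction, zero-padding loop, pop-based reversal and character tests with direct bitwise mask tests on abs(cloud_mask) (bin() of a negative prints the magnitude's digits, so A reads the magnitude's bits).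
import Mathlib
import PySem

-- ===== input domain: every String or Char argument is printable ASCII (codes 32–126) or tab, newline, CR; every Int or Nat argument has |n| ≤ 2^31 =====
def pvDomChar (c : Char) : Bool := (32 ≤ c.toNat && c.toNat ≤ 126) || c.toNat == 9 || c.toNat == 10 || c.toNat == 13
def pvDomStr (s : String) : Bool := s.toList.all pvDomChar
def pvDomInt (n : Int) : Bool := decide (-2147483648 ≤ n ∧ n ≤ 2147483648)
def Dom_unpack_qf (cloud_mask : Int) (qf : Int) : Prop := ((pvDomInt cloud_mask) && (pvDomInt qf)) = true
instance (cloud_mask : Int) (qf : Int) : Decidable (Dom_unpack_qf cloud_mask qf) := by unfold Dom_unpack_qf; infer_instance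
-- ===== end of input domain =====

-- B replaces A's bin-string building / padding / pop-reversal with direct bit tests on
-- abs(cloud_mask) (idiomatic; same return value on every input).

-- ===== PORT A =====
-- bin(n) builtin: LSB-first binary digits of a Nat (empty for 0)
def pyBinDigits : Nat → List Char
  | 0 => []
  | m + 1 => (if (m + 1) % 2 = 1 then '1' else '0') :: pyBinDigits ((m + 1) / 2)
decreasing_by exact Nat.div_lt_self (Nat.succ_pos m) (by decide)

-- bin(n): "-"? ++ "0b" ++ digits (MSB first; "0" for zero)
def pyBin (n : Int) : List Char :=
  (if n < 0 then ['-'] else []) ++ ['0', 'b'] ++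
    (if n.natAbs = 0 then ['0'] else (pyBinDigits n.natAbs).reverse)

-- `while len(unpacked) < 16: unpacked = '0' + unpacked`
def padTo16 (l : List Char) : List Char :=
  if l.length < 16 then padTo16 ('0' :: l) else l
termination_by 16 - l.length

-- `while unpacked_list: reversed += unpacked_list.pop()`
def popRev : List Char → List Char → List Char
  | acc, [] => acc
  | acc, x :: xs => popRev (acc ++ [(x :: xs).getLast (by simp)]) (x :: xs).dropLast
termination_by _ l => l.length
decreasing_by simp

def unpack_qf (cloud_mask : Int) (qf : Int) : Bool × Bool × Bool :=
  let unpacked := PySem.List.slice (pyBin cloud_mask) (some 2) none   -- bin(cloud_mask)[2:]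
  let unpacked := padTo16 unpacked
  let revd := popRev [] unpacked
  let fill := qf == 255
  let cloud := PySem.List.pyGet? revd 9 == some '1'   -- reversed[9] == '1' (index always in range)
  let shadow := PySem.List.pyGet? revd 8 == some '1'
  (fill, cloud, shadow)

-- ===== PORT B =====
def unpack_qf_alt (cloud_mask : Int) (qf : Int) : Bool × Bool × Bool :=
  let n := cloud_mask.natAbs          -- abs(cloud_mask)
  (qf == 255, n &&& (1 <<< 9) != 0, n &&& (1 <<< 8) != 0)

-- ===== PRECONDITION & SPEC =====
def Spec_unpack_qf (cloud_mask : Int) (qf : Int) (out : Bool × Bool × Bool) : Prop := out = unpack_qf_alt cloud_mask qf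
instance (cloud_mask : Int) (qf : Int) (out : Bool × Bool × Bool) : Decidable (Spec_unpack_qf cloud_mask qf out) := by unfold Spec_unpack_qf; infer_instance

-- ===== CLAIM (what is proved, stated in full; the proofs are below) =====
def Claim_equal_unpack_qf : Prop := ∀ (cloud_mask : Int) (qf : Int), Dom_unpack_qf cloud_mask qf → Spec_unpack_qf cloud_mask qf (unpack_qf cloud_mask qf)

-- ===== LEMMAS AND PROOFS =====

theorem popRev_eq : ∀ (l acc : List Char), popRev acc l = acc ++ l.reverse
  | [], acc => by simp [popRev]
  | x :: xs, acc => by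
      have hne : (x :: xs) ≠ [] := by simp
      have key : (x :: xs).reverse = (x :: xs).getLast hne :: (x :: xs).dropLast.reverse := by
        conv_lhs => rw [← List.dropLast_append_getLast hne]
        simp
      rw [popRev, popRev_eq (x :: xs).dropLast, key]
      simp
termination_by l => l.length
decreasing_by simp

theorem padTo16_eq (l : List Char) : padTo16 l = List.replicate (16 - l.length) '0' ++ l := by
  by_cases h : l.length < 16
  · rw [padTo16, if_pos h, padTo16_eq ('0' :: l)]
    have : 16 - l.length = (16 - ('0' :: l).length) + 1 := by simp; omega
    rw [this, List.replicate_succ']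
    simp
  · rw [padTo16, if_neg h]
    have : 16 - l.length = 0 := by omega
    simp [this]
termination_by 16 - l.length

theorem pyBinDigits_getElem? (m i : Nat) (h : i < (pyBinDigits m).length) :
    (pyBinDigits m)[i]? = some (if m.testBit i then '1' else '0') := by
  induction m using pyBinDigits.induct generalizing i with
  | case1 => simp [pyBinDigits] at h
  | case2 m ih =>
      rw [pyBinDigits] at h ⊢
      cases i with
      | zero =>
          simp [Nat.testBit_zero]
      | succ j =>
          simp only [List.getElem?_cons_succ]
          rw [ih j (by simpa using h)]
          rw [Nat.testBit_succ]

theorem pyBinDigits_testBit_ge (m i : Nat) (h : (pyBinDigits m).length ≤ i) :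
    m.testBit i = false := by
  induction m using pyBinDigits.induct generalizing i with
  | case1 => simp [Nat.zero_testBit]
  | case2 m ih =>
      rw [pyBinDigits] at h
      cases i with
      | zero => simp at h
      | succ j =>
          rw [Nat.testBit_succ]
          exact ih j (by simpa using h)

-- main indexing lemma: reading position i of (LSB digits ++ junk) is bit i of m, as long as junk holds no '1'
theorem getElem?_digits_append (m i : Nat) (rest : List Char) (hrest : '1' ∉ rest) :
    ((pyBinDigits m ++ rest)[i]? == some '1') = m.testBit i := by
  by_cases h : i < (pyBinDigits m).length
  · rw [List.getElem?_append_left h, pyBinDigits_getElem? m i h]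
    by_cases hb : m.testBit i <;> simp [hb]
  · rw [Nat.not_lt] at h
    rw [List.getElem?_append_right h, pyBinDigits_testBit_ge m i h]
    rcases hr : rest[i - (pyBinDigits m).length]? with _ | c
    · simp
    · have hc : c ∈ rest := List.mem_of_getElem? hr
      have hc1 : c ≠ '1' := fun hce => hrest (hce ▸ hc)
      simp [hc1]

theorem revd_bit (n : Int) (i : Nat) :
    (PySem.List.pyGet? (popRev [] (padTo16 (PySem.List.slice (pyBin n) (some 2) none))) (i : Int)
      == some '1') = n.natAbs.testBit i := by
  rw [popRev_eq, padTo16_eq]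
  have hslice : PySem.List.slice (pyBin n) (some (2:Int)) none = (pyBin n).drop 2 := by
    have := PySem.List.slice_from_natCast (xs := pyBin n) (a := 2)
    simpa using this
  rw [hslice]
  unfold pyBin
  by_cases hneg : n < 0
  · have hz : n.natAbs ≠ 0 := by omega
    simp only [hneg, hz, if_true, if_false, if_neg, List.nil_append, List.cons_append,
      List.drop, List.reverse_append, List.reverse_cons, List.reverse_nil, List.nil_append,
      List.reverse_reverse, List.reverse_replicate, List.append_assoc, PySem.List.pyGet?_natCast]
    simpa using getElem?_digits_append n.natAbs i
      (['b'] ++ List.replicate (16 - ('b' :: (pyBinDigits n.natAbs).reverse).length) '0') (by simp)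
  · by_cases hz : n.natAbs = 0
    · simp only [hneg, hz, if_true, if_false, if_neg, List.nil_append, List.cons_append,
        List.drop, List.reverse_append, List.reverse_cons, List.reverse_nil, List.nil_append,
        List.reverse_reverse, List.reverse_replicate, List.append_assoc, PySem.List.pyGet?_natCast]
      have h0 := getElem?_digits_append 0 i
        (['0'] ++ List.replicate (16 - (['0'] : List Char).length) '0') (by simp)
      simpa [pyBinDigits] using h0
    · simp only [hneg, hz, if_true, if_false, if_neg, List.nil_append, List.cons_append,
        List.drop, List.reverse_append, List.reverse_cons, List.reverse_nil, List.nil_append,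
        List.reverse_reverse, List.reverse_replicate, List.append_assoc, PySem.List.pyGet?_natCast]
      simpa using getElem?_digits_append n.natAbs i
        (List.replicate (16 - (pyBinDigits n.natAbs).reverse.length) '0') (by simp)

theorem and_pow_ne_zero (m i : Nat) : (m &&& (1 <<< i) != 0) = m.testBit i := by
  rw [Nat.shiftLeft_eq, one_mul, Nat.and_two_pow]
  by_cases hb : m.testBit i <;> simp [hb, Nat.pow_eq_zero]

-- ===== VERDICT (by name: the statement is the Claim_ definition above) =====
theorem unpack_qf_spec : Claim_equal_unpack_qf := by
  intro cloud_mask qf _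
  show unpack_qf cloud_mask qf = unpack_qf_alt cloud_mask qf
  unfold unpack_qf unpack_qf_alt
  refine Prod.ext rfl (Prod.ext ?_ ?_) <;> simp only []
  · rw [show (9 : Int) = ((9 : Nat) : Int) from rfl, revd_bit cloud_mask 9, and_pow_ne_zero]
  · rw [show (8 : Int) = ((8 : Nat) : Int) from rfl, revd_bit cloud_mask 8, and_pow_ne_zero]
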